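-- pv_equiv track=rewrite | github.com/JGEnglishLab/ConSeqUMI | src/umi/umiBinningFunctions.py | remove_indices_from_related_lists
-- ===== SOURCE A (Python) =====
-- def remove_indices_from_related_lists(listOfLists, removeIndices):
--     removeIndicesSet = set(removeIndices)
--     editedLists = []
--     for l in listOfLists:
--         editedList = []
--         for idx, ele in enumerate(l):
--             if idx not in removeIndicesSet:
--                 editedList.append(ele)
--         editedLists.append(editedList)
--     return editedLists
-- ===== SOURCE B (Python) =====
-- def remove_indices_from_related_lists(listOfLists, removeIndices):
--     editedLists = []
--     for l in listOfLists:
--         copy = l[:]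
--         for i in sorted({i for i in removeIndices if 0 <= i < len(l)}, reverse=True):
--             del copy[i]
--         editedLists.append(copy)
--     return editedLists
-- ===== Notes on version B (the rewrite author's own statement) =====
-- stated objective: alternative
-- what changed: Replaces the per-element enumerate/set-membership filter with a copy-then-delete pass: the in-range removal positions are sorted in descending order and deleted in place from a shallow copy of each inner list.
import Mathlib
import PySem

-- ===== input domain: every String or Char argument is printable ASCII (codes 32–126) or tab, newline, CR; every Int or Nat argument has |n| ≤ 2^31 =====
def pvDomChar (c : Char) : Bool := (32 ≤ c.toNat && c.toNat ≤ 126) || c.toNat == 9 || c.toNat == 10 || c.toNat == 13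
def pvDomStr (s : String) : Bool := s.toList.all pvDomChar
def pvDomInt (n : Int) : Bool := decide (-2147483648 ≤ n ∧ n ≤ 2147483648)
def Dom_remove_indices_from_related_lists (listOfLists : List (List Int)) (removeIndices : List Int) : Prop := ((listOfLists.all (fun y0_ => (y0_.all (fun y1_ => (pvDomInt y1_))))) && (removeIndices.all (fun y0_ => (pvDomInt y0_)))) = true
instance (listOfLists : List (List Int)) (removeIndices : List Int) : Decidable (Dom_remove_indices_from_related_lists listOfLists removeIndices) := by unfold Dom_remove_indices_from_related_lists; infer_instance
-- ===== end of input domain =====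

-- B replaces the enumerate/set-membership filter by deleting the in-range removal
-- positions, sorted descending, from a copy of each inner list (alternative decomposition).

-- ===== PORT A =====
def remove_indices_from_related_lists (listOfLists : List (List Int)) (removeIndices : List Int) : List (List Int) :=
  let removeIndicesSet := PySem.Set.ofList removeIndices
  listOfLists.foldl (fun editedLists l =>
    editedLists ++ [(PySem.List.enumerate l).foldl (fun editedList q =>
      if q.1 ∉ removeIndicesSet then editedList ++ [q.2] else editedList) []]) []

-- ===== PORT B =====
def remove_indices_from_related_lists_alt (listOfLists : List (List Int)) (removeIndices : List Int) : List (List Int) :=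
  listOfLists.foldl (fun editedLists l =>
    editedLists ++
      [(PySem.List.sorted
          (PySem.Set.ofList (removeIndices.filter (fun i => decide (0 ≤ i) && decide (i < (l.length : Int)))))
          (fun x => x) true).foldl (fun copy i => copy.eraseIdx i.toNat) l]) []

-- ===== PRECONDITION & SPEC =====
def Spec_remove_indices_from_related_lists (listOfLists : List (List Int)) (removeIndices : List Int) (out : List (List Int)) : Prop := out = remove_indices_from_related_lists_alt listOfLists removeIndices
instance (listOfLists : List (List Int)) (removeIndices : List Int) (out : List (List Int)) : Decidable (Spec_remove_indices_from_related_lists listOfLists removeIndices out) := by unfold Spec_remove_indices_from_related_lists; infer_instance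

-- ===== CLAIM (what is proved, stated in full; the proofs are below) =====
def Claim_equal_remove_indices_from_related_lists : Prop := ∀ (listOfLists : List (List Int)) (removeIndices : List Int), Dom_remove_indices_from_related_lists listOfLists removeIndices → Spec_remove_indices_from_related_lists listOfLists removeIndices (remove_indices_from_related_lists listOfLists removeIndices)

-- ===== LEMMAS AND PROOFS =====

/-- Canonical form of a per-list result: keep the elements whose (Python) index,
counted from `k`, satisfies `p`. -/
def idxKeep (l : List Int) (p : Int → Bool) (k : Int) : List Int :=
  ((PySem.List.enumerate l k).filter (fun q => p q.1)).map (·.2)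

theorem idxKeep_cons (x : Int) (l : List Int) (p : Int → Bool) (k : Int) :
    idxKeep (x :: l) p k = (if p k then [x] else []) ++ idxKeep l p (k + 1) := by
  simp [idxKeep, PySem.List.enumerate_cons, List.filter_cons]
  split_ifs <;> simp

theorem idxKeep_all_true (l : List Int) (p : Int → Bool) (k : Int)
    (h : ∀ m, k ≤ m → p m = true) : idxKeep l p k = l := by
  induction l generalizing k with
  | nil => rfl
  | cons x xs ih =>
      rw [idxKeep_cons, h k le_rfl, ih (k + 1) (fun m hm => h m (by omega))]
      simp

theorem idxKeep_congr (l : List Int) (p q : Int → Bool) (k : Int)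
    (h : ∀ m, k ≤ m → m < k + l.length → p m = q m) :
    idxKeep l p k = idxKeep l q k := by
  induction l generalizing k with
  | nil => rfl
  | cons x xs ih =>
      rw [idxKeep_cons, idxKeep_cons,
        h k le_rfl (by simp only [List.length_cons]; push_cast; omega),
        ih (k + 1) (fun m h1 h2 => h m (by omega)
          (by simp only [List.length_cons] at *; push_cast at *; omega))]

theorem idxKeep_append (a b : List Int) (p : Int → Bool) (k : Int) :
    idxKeep (a ++ b) p k = idxKeep a p k ++ idxKeep b p (k + a.length) := by
  simp [idxKeep, PySem.List.enumerate_append]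

/-- Deleting a strictly descending list of valid positions = filtering by index. -/
theorem foldl_eraseIdx_eq_idxKeep (idxs : List Int) (l : List Int)
    (hdesc : idxs.Pairwise (fun a b => b < a))
    (hrange : ∀ i ∈ idxs, 0 ≤ i ∧ i < (l.length : Int)) :
    idxs.foldl (fun copy i => copy.eraseIdx i.toNat) l
      = idxKeep l (fun m => decide (m ∉ idxs)) 0 := by
  induction idxs generalizing l with
  | nil => simp [idxKeep_all_true]
  | cons j rest ih =>
      obtain ⟨hj0, hjl⟩ := hrange j (by simp)
      have hjn : j.toNat < l.length := by omega
      have hrest_lt : ∀ i ∈ rest, i < j := by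
        intro i hi; exact (List.pairwise_cons.mp hdesc).1 i hi
      rw [List.foldl_cons,
        ih (l.eraseIdx j.toNat) (List.pairwise_cons.mp hdesc).2
          (by
            intro i hi
            obtain ⟨h0, _⟩ := hrange i (by simp [hi])
            refine ⟨h0, ?_⟩
            rw [List.length_eraseIdx_of_lt hjn]
            have := hrest_lt i hi
            omega)]
      -- rewrite both sides through take/drop decompositions
      have hsplit : l = l.take j.toNat ++ l[j.toNat] :: l.drop (j.toNat + 1) := by
        conv_lhs => rw [← List.take_append_drop j.toNat l]
        rw [List.drop_eq_getElem_cons hjn]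
      have herase : l.eraseIdx j.toNat = l.take j.toNat ++ l.drop (j.toNat + 1) :=
        List.eraseIdx_eq_take_drop_succ l j.toNat
      have hlen : ((l.take j.toNat).length : Int) = j := by
        simp [List.length_take, Nat.min_eq_left (Nat.le_of_lt hjn)]
        omega
      rw [herase, idxKeep_append]
      conv_rhs => rw [hsplit, idxKeep_append, idxKeep_cons]
      rw [hlen]
      simp only [zero_add]
      rw [if_neg (show ¬(decide (j ∉ j :: rest) = true) by simp)]
      congr 1
      · -- prefixes: indices below j agree
        apply idxKeep_congr
        intro m hm1 hm2
        rw [hlen] at hm2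
        simp only [List.mem_cons, decide_eq_decide]
        have : m ≠ j := by omega
        tauto
      · -- suffixes: all indices ≥ j (resp. ≥ j+1) are kept
        simp only [List.nil_append]
        rw [idxKeep_all_true _ _ _ (fun m hm => by
          simp only [decide_eq_true_eq]
          intro hmem
          have := hrest_lt m hmem
          omega)]
        rw [idxKeep_all_true _ _ _ (fun m hm => by
          simp only [List.mem_cons, decide_eq_true_eq, not_or]
          constructor
          · omega
          · intro hmem
            have := hrest_lt m hmem
            omega)]

/-- The per-list computations of the two ports agree. -/
theorem per_list_eq (l : List Int) (removeIndices : List Int) :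
    (PySem.List.enumerate l).foldl (fun editedList q =>
        if q.1 ∉ PySem.Set.ofList removeIndices then editedList ++ [q.2] else editedList) []
      = (PySem.List.sorted
          (PySem.Set.ofList (removeIndices.filter (fun i => decide (0 ≤ i) && decide (i < (l.length : Int)))))
          (fun x => x) true).foldl (fun copy i => copy.eraseIdx i.toNat) l := by
  set idxs := PySem.List.sorted
      (PySem.Set.ofList (removeIndices.filter (fun i => decide (0 ≤ i) && decide (i < (l.length : Int)))))
      (fun x => x) true with hidxs
  have hperm : idxs.Perm (PySem.Set.ofList (removeIndices.filter (fun i => decide (0 ≤ i) && decide (i < (l.length : Int))))) :=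
    PySem.List.sorted_perm _ _ _
  have hnodup : idxs.Nodup := hperm.nodup_iff.mpr (PySem.Set.nodup_ofList _)
  have hle : idxs.Pairwise (fun a b => (fun x => x) b ≤ (fun x => x) a) :=
    PySem.List.sorted_pairwise_rev _ _
  have hdesc : idxs.Pairwise (fun a b => b < a) := by
    have := hle.and hnodup
    exact this.imp (fun {a b} h => lt_of_le_of_ne h.1 (Ne.symm h.2))
  have hmem : ∀ i, i ∈ idxs ↔ (i ∈ removeIndices ∧ 0 ≤ i ∧ i < (l.length : Int)) := by
    intro i
    rw [hperm.mem_iff, PySem.Set.mem_ofList, List.mem_filter]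
    simp
  have hrange : ∀ i ∈ idxs, 0 ≤ i ∧ i < (l.length : Int) := fun i hi => ((hmem i).mp hi).2
  rw [foldl_eraseIdx_eq_idxKeep idxs l hdesc hrange,
    PySem.List.foldl_append_ite (p := fun q : Int × Int => q.1 ∉ PySem.Set.ofList removeIndices)
      (f := fun q : Int × Int => q.2)]
  simp only [List.nil_append]
  show idxKeep l (fun m => decide (m ∉ PySem.Set.ofList removeIndices)) 0
      = idxKeep l (fun m => decide (m ∉ idxs)) 0
  apply idxKeep_congr
  intro m hm1 hm2
  simp only [decide_eq_decide]
  rw [hmem m, PySem.Set.mem_ofList]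
  simp at hm2
  constructor
  · intro h ⟨h1, _⟩; exact h h1
  · intro h h1; exact h ⟨h1, hm1, hm2⟩

-- ===== VERDICT (by name: the statement is the Claim_ definition above) =====
theorem remove_indices_from_related_lists_spec : Claim_equal_remove_indices_from_related_lists := by
  intro listOfLists removeIndices _
  show remove_indices_from_related_lists listOfLists removeIndices
      = remove_indices_from_related_lists_alt listOfLists removeIndices
  unfold remove_indices_from_related_lists remove_indices_from_related_lists_alt
  rw [PySem.List.foldl_append_singleton_eq_map, PySem.List.foldl_append_singleton_eq_map]
  simp only [List.nil_append]
  exact List.map_congr_left (fun l _ => per_list_eq l removeIndices)
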